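-- pv_equiv track=rewrite | github.com/Ch3shireDev/Zajecia-przerwa | konkurs/PWN31_2_z3.py | wagi
-- ===== SOURCE A (Python) =====
-- def czslowo(slowo):
--     wagi = []
--     x = 1
--     for i in range(len(slowo)):
--         if len(slowo) % 2 == 0 and i == len(slowo)//2:
--             x -= 1
--         wagi += [x]
--         if i+1 > len(slowo)//2:
--             x -= 1
--         else:
--             x += 1
--     return wagi
--
-- def czslowo2(slowo):
--     wagi = czslowo(slowo)
--     wagi2 = []
--     for i in range(len(wagi)):
--         if slowo[i] in "aeiouy":
--             wagi2 += [wagi[i]-1]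
--         else:
--             wagi2 += [wagi[i]+1]
--     return sum(wagi2)
--
-- def wagi(zdanie):
--     zdanie = zdanie.split()
--     tab = []
--     slowo = ""
--     maks = 0
--     for i in range(len(zdanie)):
--         tab += [(czslowo2(zdanie[i]), zdanie[i])]
--     tab2 = []
--     for i in range(len(tab)):
--         tab2 += [max(tab)]
--         tab.remove(max(tab))
--     slowo2 = ""
--     tab2 = tab2[::-1]
--     for i in range(len(tab2)):
--         x, y = tab2[i]
--         slowo2 += y
--         if i != len(tab2)-1:
--             slowo2 += " "
--
--     return slowo2
-- ===== SOURCE B (Python) =====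
-- def wagi(zdanie):
--     def weight(w):
--         n = len(w)
--         base = sum(min(i + 1, n - i) for i in range(n))
--         return base + sum(-1 if c in "aeiouy" else 1 for c in w)
--     pairs = sorted((weight(w), w) for w in zdanie.split())
--     return " ".join(w for _, w in pairs)
-- ===== Notes on version B (the rewrite author's own statement) =====
-- stated objective: faster
-- what changed: The iterative pyramid-building weight loop (czslowo/czslowo2 accumulator over positions) is replaced by the closed-form sum(min(i+1,n-i)) plus a per-letter +/-1 sum, and the quadratic repeated-max-extraction selection sort is replaced by a single builtin sorted() over the (weight, word) pairs.
import Mathlib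
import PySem

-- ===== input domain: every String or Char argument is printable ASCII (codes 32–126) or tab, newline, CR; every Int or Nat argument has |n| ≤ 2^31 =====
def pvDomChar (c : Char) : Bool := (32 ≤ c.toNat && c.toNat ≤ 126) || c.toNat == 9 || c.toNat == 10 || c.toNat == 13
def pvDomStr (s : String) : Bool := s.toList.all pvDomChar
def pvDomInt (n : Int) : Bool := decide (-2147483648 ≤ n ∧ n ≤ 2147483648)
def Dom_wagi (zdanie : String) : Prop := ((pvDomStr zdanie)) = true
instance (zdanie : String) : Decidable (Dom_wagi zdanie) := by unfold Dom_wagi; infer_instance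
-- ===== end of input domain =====

-- B replaces A's accumulator-driven per-position weight loop by the closed form min(i+1,n-i)
-- and A's quadratic repeated-max selection sort by one builtin ascending sort of the (weight, word) pairs.

-- ===== PORT A =====
-- czslowo: builds the per-position base weights with a running accumulator x.
def czslowo (slowo : String) : List Int :=
  let n := PySem.Str.len slowo
  ((PySem.List.pyRange 0 n).foldl (fun (s : List Int × Int) i =>
      let x := if PySem.Int.mod n 2 == 0 && i == PySem.Int.floordiv n 2 then s.2 - 1 else s.2
      (s.1 ++ [x], if i + 1 > PySem.Int.floordiv n 2 then x - 1 else x + 1))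
    ([], 1)).1

-- czslowo2: adjusts each base weight by -1 for a vowel, +1 otherwise, and sums.
-- `slowo[i] in "aeiouy"` for the single character slowo[i] is exactly char membership; the
-- index i is always in range in A, pyGetD's defaults are never used.
def czslowo2 (slowo : String) : Int :=
  let w := czslowo slowo
  let w2 := (PySem.List.pyRange 0 (PySem.List.len w)).foldl (fun acc i =>
      if "aeiouy".toList.contains (PySem.List.pyGetD slowo.toList i ' ')
      then acc ++ [PySem.List.pyGetD w i 0 - 1]
      else acc ++ [PySem.List.pyGetD w i 0 + 1]) []
  w2.sum

-- one iteration of A's selection loop: tab2 += [max(tab)]; tab.remove(max(tab)).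
-- Python's max on (int, str) tuples is the lexicographic (toLex) order; max(tab) on the empty
-- list and remove of a non-member would raise in Python but are unreachable here (the loop
-- runs exactly len(tab) times and max? returns a member), so those match arms return the
-- state unchanged.
def selStep (s : List (Int × String) × List (Int × String)) (_ : Int) :
    List (Int × String) × List (Int × String) :=
  match PySem.List.max? s.1 (fun p => toLex p) with
  | some m =>
      match PySem.List.remove? s.1 m with
      | some t => (t, s.2 ++ [m])
      | none => s
  | none => s

-- wagi: A's main function. The string slowo2 built by += is ported as a List Char
-- accumulator wrapped with String.ofList at the end (PySem string ops live on List Char).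
def wagi (zdanie : String) : String :=
  let zd := PySem.Str.split₀ zdanie
  let tab := (PySem.List.pyRange 0 (PySem.List.len zd)).foldl
      (fun acc i => acc ++ [(czslowo2 (PySem.List.pyGetD zd i ""), PySem.List.pyGetD zd i "")]) []
  let tab2 := ((PySem.List.pyRange 0 (PySem.List.len tab)).foldl selStep (tab, [])).2
  let tab2 := (PySem.List.slice? tab2 none none (-1)).getD []
  let chars := (PySem.List.pyRange 0 (PySem.List.len tab2)).foldl
      (fun acc i =>
        let p := PySem.List.pyGetD tab2 i (0, "")
        let acc := acc ++ p.2.toList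
        if i ≠ PySem.List.len tab2 - 1 then acc ++ [' '] else acc) []
  String.ofList chars

-- ===== PORT B =====
-- closed-form weight: sum of min(i+1, n-i) over positions, plus -1 per vowel / +1 per other char.
def weight_alt (w : String) : Int :=
  let n := PySem.Str.len w
  let base := ((PySem.List.pyRange 0 n).map (fun i => min (i + 1) (n - i))).sum
  base + (w.toList.map (fun c => if "aeiouy".toList.contains c then (-1 : Int) else 1)).sum

-- sorted(pairs) on (int, str) tuples is the ascending lexicographic (toLex) sort.
def wagi_alt (zdanie : String) : String :=
  let pairs := PySem.List.sorted ((PySem.Str.split₀ zdanie).map (fun w => (weight_alt w, w)))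
      (fun p => toLex p)
  PySem.Str.join " " (pairs.map (fun p => p.2))

-- ===== PRECONDITION & SPEC =====
def Spec_wagi (zdanie : String) (out : String) : Prop := out = wagi_alt zdanie
instance (zdanie : String) (out : String) : Decidable (Spec_wagi zdanie out) := by unfold Spec_wagi; infer_instance

-- ===== CLAIM (what is proved, stated in full; the proofs are below) =====
def Claim_equal_wagi : Prop := ∀ (zdanie : String), Dom_wagi zdanie → Spec_wagi zdanie (wagi zdanie)

-- ===== LEMMAS AND PROOFS =====

-- the value appended at position i by czslowo's loop
def pyr (n i : Int) : Int := min (i + 1) (n - i)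

-- the loop accumulator x of czslowo on entry to iteration k
def xF (n k : Int) : Int :=
  min (k + 1) (n - k) + (if PySem.Int.mod n 2 = 0 ∧ k = PySem.Int.floordiv n 2 then 1 else 0)

theorem xF_zero (n : Int) (hn : 0 ≤ n) : xF n 0 = 1 := by
  unfold xF
  rw [PySem.Int.mod_eq_emod_of_pos (show (0:Int) < 2 by omega), PySem.Int.floordiv_eq_ediv_of_pos (show (0:Int) < 2 by omega)]
  split_ifs with h <;> omega

theorem czslowo_inv (n : Int) : ∀ (m : Nat) (k : Int), 0 ≤ k → k + m = n → ∀ (lst : List Int),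
    (PySem.List.pyRange k n).foldl (fun (s : List Int × Int) i =>
      let x := if PySem.Int.mod n 2 == 0 && i == PySem.Int.floordiv n 2 then s.2 - 1 else s.2
      (s.1 ++ [x], if i + 1 > PySem.Int.floordiv n 2 then x - 1 else x + 1)) (lst, xF n k)
    = (lst ++ (PySem.List.pyRange k n).map (pyr n), xF n n) := by
  intro m
  induction m with
  | zero =>
      intro k hk hkn lst
      have hkn' : k = n := by omega
      subst hkn'
      rw [PySem.List.pyRange_one_eq_nil (by omega)]
      simp
  | succ m ih =>
      intro k hk hkn lst
      rw [PySem.List.pyRange_one_cons (by omega)]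
      have hx1 : (if PySem.Int.mod n 2 == 0 && (k == PySem.Int.floordiv n 2) then xF n k - 1 else xF n k)
          = pyr n k := by
        unfold xF pyr
        rw [PySem.Int.mod_eq_emod_of_pos (show (0:Int) < 2 by omega), PySem.Int.floordiv_eq_ediv_of_pos (show (0:Int) < 2 by omega)]
        simp only [Bool.and_eq_true, beq_iff_eq]
        split_ifs <;> simp_all
      have hx2 : (if k + 1 > PySem.Int.floordiv n 2 then pyr n k - 1 else pyr n k + 1) = xF n (k + 1) := by
        unfold xF pyr
        rw [PySem.Int.mod_eq_emod_of_pos (show (0:Int) < 2 by omega), PySem.Int.floordiv_eq_ediv_of_pos (show (0:Int) < 2 by omega)]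
        split_ifs <;> omega
      simp only [List.foldl_cons, hx1, hx2]
      rw [ih (k + 1) (by omega) (by omega) (lst ++ [pyr n k])]
      rw [List.map_cons]
      simp [List.append_assoc]

theorem czslowo_eq (slowo : String) :
    czslowo slowo = (PySem.List.pyRange 0 (PySem.Str.len slowo)).map (pyr (PySem.Str.len slowo)) := by
  have hn : 0 ≤ PySem.Str.len slowo := by rw [PySem.Str.len_eq]; positivity
  have h := czslowo_inv (PySem.Str.len slowo) (PySem.Str.len slowo).toNat 0 (by omega) (by omega) []
  rw [xF_zero _ hn] at h
  simp only [czslowo, h]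
  simp

theorem czslowo2_eq (slowo : String) : czslowo2 slowo = weight_alt slowo := by
  simp only [czslowo2, weight_alt, czslowo_eq]
  have hb : (fun (acc : List Int) (i : Int) =>
        if "aeiouy".toList.contains (PySem.List.pyGetD slowo.toList i ' ')
        then acc ++ [PySem.List.pyGetD ((PySem.List.pyRange 0 (PySem.Str.len slowo)).map (pyr (PySem.Str.len slowo))) i 0 - 1]
        else acc ++ [PySem.List.pyGetD ((PySem.List.pyRange 0 (PySem.Str.len slowo)).map (pyr (PySem.Str.len slowo))) i 0 + 1])
      = fun acc i => acc ++ [PySem.List.pyGetD ((PySem.List.pyRange 0 (PySem.Str.len slowo)).map (pyr (PySem.Str.len slowo))) i 0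
          + (if "aeiouy".toList.contains (PySem.List.pyGetD slowo.toList i ' ') then (-1 : Int) else 1)] := by
    funext acc i
    split_ifs <;> simp [sub_eq_add_neg]
  rw [hb, PySem.List.foldl_append_singleton_eq_map, List.nil_append, PySem.List.sum_map_add_int,
      PySem.List.map_pyGetD_pyRange_zero]
  have hlen : PySem.List.len ((PySem.List.pyRange 0 (PySem.Str.len slowo)).map (pyr (PySem.Str.len slowo)))
      = PySem.List.len slowo.toList := by
    simp [PySem.List.len_eq, PySem.List.length_pyRange_one, PySem.Str.len_eq]
  rw [hlen]
  rw [show (fun (i : Int) => if "aeiouy".toList.contains (PySem.List.pyGetD slowo.toList i ' ') then (-1 : Int) else 1)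
      = (fun c => if "aeiouy".toList.contains c then (-1 : Int) else 1) ∘ (fun i => PySem.List.pyGetD slowo.toList i ' ') from rfl,
    ← List.map_map, PySem.List.map_pyGetD_pyRange_zero]
  simp
  rfl

-- A's selection loop, extracted: one step ignores its index
def selIter (s : List (Int × String) × List (Int × String)) :
    List (Int × String) × List (Int × String) := selStep s 0

theorem foldl_selStep_eq_iterate (l : List Int) (s : List (Int × String) × List (Int × String)) :
    l.foldl selStep s = selIter^[l.length] s := by
  induction l generalizing s with
  | nil => rfl
  | cons x t ih => simp only [List.foldl_cons, List.length_cons, Function.iterate_succ_apply]; exact ih _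

-- repeated extraction of the (first) maximum, in extraction (descending) order
def sel (t : List (Int × String)) : List (Int × String) :=
  match h : PySem.List.max? t (fun p => toLex p) with
  | none => []
  | some m => m :: sel (t.erase m)
termination_by t.length
decreasing_by
  have hm := PySem.List.max?_mem h
  have := List.length_erase_of_mem hm
  have := List.length_pos_of_mem hm
  omega

theorem sel_nil : sel [] = [] := by
  rw [sel]
  rfl

theorem sel_nil' {t : List (Int × String)}
    (h : PySem.List.max? t (fun p => toLex p) = none) : sel t = [] := by
  have := (PySem.List.max?_eq_none_iff t _).mp h
  subst this
  exact sel_nil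

theorem sel_cons {t : List (Int × String)} {m : Int × String}
    (hm : PySem.List.max? t (fun p => toLex p) = some m) :
    sel t = m :: sel (t.erase m) := by
  rw [sel]
  split
  · simp_all
  · rename_i h
    rw [hm] at h
    cases h
    rfl

theorem max?_of_length_succ {t : List (Int × String)} {k : Nat} (h : t.length = k + 1) :
    ∃ m, PySem.List.max? t (fun p => toLex p) = some m := by
  cases hmx : PySem.List.max? t (fun p => toLex p) with
  | none =>
      have := (PySem.List.max?_eq_none_iff t _).mp hmx
      subst this
      simp at h
  | some m => exact ⟨m, rfl⟩

theorem sel_iterate (k : Nat) : ∀ (t : List (Int × String)) (acc : List (Int × String)),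
    t.length = k → selIter^[k] (t, acc) = ([], acc ++ sel t) := by
  induction k with
  | zero =>
      intro t acc h
      have ht : t = [] := List.length_eq_zero_iff.mp h
      subst ht
      simp [sel_nil]
  | succ k ih =>
      intro t acc h
      obtain ⟨m, hm⟩ := max?_of_length_succ h
      have hmem := PySem.List.max?_mem hm
      have hstep : selIter (t, acc) = (t.erase m, acc ++ [m]) := by
        unfold selIter selStep
        simp [hm, PySem.List.remove?_eq_some_erase t m hmem]
      rw [Function.iterate_succ_apply, hstep,
          ih _ _ (by rw [List.length_erase_of_mem hmem, h]; rfl),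
          sel_cons hm]
      simp

theorem sel_mem : ∀ (t : List (Int × String)) (y : Int × String), y ∈ sel t → y ∈ t := by
  intro t
  induction t using sel.induct with
  | case1 t h => intro y hy; rw [sel_nil' h] at hy; cases hy
  | case2 t m h ih =>
      intro y hy
      rw [sel_cons h, List.mem_cons] at hy
      rcases hy with hy | hy
      · simpa [hy] using PySem.List.max?_mem h
      · exact List.mem_of_mem_erase (ih y hy)

theorem sel_pairwise : ∀ (t : List (Int × String)),
    (sel t).Pairwise (fun a b => (toLex b : Lex (Int × String)) ≤ toLex a) := by
  intro t
  induction t using sel.induct with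
  | case1 t h => rw [sel_nil' h]; exact List.Pairwise.nil
  | case2 t m h ih =>
      rw [sel_cons h]
      refine List.Pairwise.cons ?_ ih
      intro y hy
      exact PySem.List.max?_isMax h y (List.mem_of_mem_erase (sel_mem _ y hy))

theorem sel_perm : ∀ (t : List (Int × String)), (sel t).Perm t := by
  intro t
  induction t using sel.induct with
  | case1 t h =>
      rw [sel_nil' h, (PySem.List.max?_eq_none_iff t _).mp h]
  | case2 t m h ih =>
      rw [sel_cons h]
      exact (ih.cons m).trans (List.perm_cons_erase (PySem.List.max?_mem h)).symm

theorem sel_reverse_eq_sorted (t : List (Int × String)) :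
    (sel t).reverse = PySem.List.sorted t (fun p => toLex p) false := by
  apply PySem.List.eq_of_perm_of_pairwise_le_of_injective (fun p => (toLex p : Lex (Int × String)))
  · exact fun a b h => toLex.injective h
  · exact ((sel t).reverse_perm.trans (sel_perm t)).trans (PySem.List.sorted_perm t _ false).symm
  · exact List.pairwise_reverse.mpr (sel_pairwise t)
  · exact PySem.List.sorted_pairwise t _

-- ' '-joined concatenation of the words, as A's last loop builds it
def joinWords : List String → List Char
  | [] => []
  | [y] => y.toList
  | y :: z :: r => y.toList ++ ' ' :: joinWords (z :: r)

theorem joinWords_eq_join (ys : List String) :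
    joinWords ys = PySem.Chars.join [' '] (ys.map String.toList) := by
  induction ys using joinWords.induct with
  | case1 => simp [joinWords, PySem.Chars.join_nil]
  | case2 y => simp [joinWords, PySem.Chars.join_singleton]
  | case3 y z r ih => simp [joinWords, PySem.Chars.join_cons_cons, ih]

theorem join_fold (ys : List (Int × String)) : ∀ (m a : Nat) (acc : List Char), a + m = ys.length →
    (PySem.List.pyRange (a : Int) (PySem.List.len ys)).foldl
      (fun acc i =>
        if i ≠ PySem.List.len ys - 1
        then acc ++ (PySem.List.pyGetD ys i (0, "")).2.toList ++ [' ']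
        else acc ++ (PySem.List.pyGetD ys i (0, "")).2.toList) acc
    = acc ++ joinWords ((ys.drop a).map (fun p => p.2)) := by
  intro m
  induction m with
  | zero =>
      intro a acc h
      rw [PySem.List.pyRange_one_eq_nil (by rw [PySem.List.len_eq]; omega),
          List.drop_of_length_le (by omega)]
      simp [joinWords]
  | succ m ih =>
      intro a acc h
      have ha : a < ys.length := by omega
      rw [PySem.List.pyRange_one_cons (by rw [PySem.List.len_eq]; omega)]
      simp only [List.foldl_cons]
      have hget : PySem.List.pyGetD ys (a : Int) (0, "") = ys[a] :=
        (PySem.List.pyGetD_natCast ys a _).trans (List.getD_eq_getElem _ _ ha)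
      rw [hget]
      by_cases hlast : m = 0
      · subst hlast
        rw [if_neg (show ¬ ((a : Int) ≠ PySem.List.len ys - 1) by rw [PySem.List.len_eq]; omega),
            PySem.List.pyRange_one_eq_nil (by rw [PySem.List.len_eq]; omega)]
        simp only [List.foldl_nil]
        rw [List.drop_eq_getElem_cons ha, List.drop_of_length_le (by omega)]
        simp [joinWords]
      · rw [if_pos (show ((a : Int) ≠ PySem.List.len ys - 1) by rw [PySem.List.len_eq]; omega)]
        rw [show ((a : Int) + 1) = ((a + 1 : Nat) : Int) by push_cast; ring,
            ih (a + 1) _ (by omega),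
            List.drop_eq_getElem_cons ha,
            List.drop_eq_getElem_cons (show a + 1 < ys.length by omega)]
        simp only [List.map_cons, joinWords, List.append_assoc,
          List.cons_append, List.nil_append]

-- ===== VERDICT (by name: the statement is the Claim_ definition above) =====
theorem join_fold0 (ys : List (Int × String)) :
    (PySem.List.pyRange 0 (PySem.List.len ys)).foldl
      (fun acc i =>
        if i ≠ PySem.List.len ys - 1
        then acc ++ (PySem.List.pyGetD ys i (0, "")).2.toList ++ [' ']
        else acc ++ (PySem.List.pyGetD ys i (0, "")).2.toList) []
    = joinWords (ys.map (fun p => p.2)) := by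
  have h := join_fold ys ys.length 0 [] (by omega)
  rw [Nat.cast_zero] at h
  simpa using h

theorem wagi_spec : Claim_equal_wagi := by
  unfold Claim_equal_wagi
  intro zdanie _
  unfold Spec_wagi
  simp only [wagi, wagi_alt]
  rw [PySem.List.len_eq (PySem.Str.split₀ zdanie),
      PySem.List.foldl_pyRange_zero_pyGetD' (PySem.Str.split₀ zdanie) ""
        (fun acc w => acc ++ [((czslowo2 w, w) : Int × String)]) [],
      PySem.List.foldl_append_singleton_eq_map (fun w => ((czslowo2 w, w) : Int × String)),
      List.nil_append,
      show List.map (fun w => ((czslowo2 w, w) : Int × String)) (PySem.Str.split₀ zdanie)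
          = List.map (fun w => ((weight_alt w, w) : Int × String)) (PySem.Str.split₀ zdanie) from
        List.map_congr_left (fun w _ => by rw [czslowo2_eq])]
  set P := List.map (fun w => ((weight_alt w, w) : Int × String)) (PySem.Str.split₀ zdanie) with hP
  rw [foldl_selStep_eq_iterate,
      show (PySem.List.pyRange 0 (PySem.List.len P)).length = P.length by
        simp [PySem.List.len_eq, PySem.List.length_pyRange_one],
      sel_iterate P.length P [] rfl]
  simp only [List.nil_append]
  rw [PySem.List.slice?_none_none_neg_one, Option.getD_some,
      join_fold0 ((sel P).reverse),
      sel_reverse_eq_sorted, joinWords_eq_join]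
  apply String.toList_inj.mp
  rw [PySem.Str.toList_join]
  simp
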